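-- pv_equiv track=rewrite | github.com/blackjins/python_practice | H.W(eleven-2_weak)/number_twoel.py | int_clone
-- ===== SOURCE A (Python) =====
-- def int_clone(a, n):
--     assert n > 0
--     tmp = a
--     num = []
--     for i in range(n):
--         num.append(a)
--         a = a + tmp
--
--     return num
-- ===== SOURCE B (Python) =====
-- def int_clone(a, n):
--     assert n > 0
--     return [a * (i + 1) for i in range(n)]
-- ===== Notes on version B (the rewrite author's own statement) =====
-- stated objective: simpler
-- what changed: B computes each element directly as a*(i+1) in one comprehension instead of carrying a running accumulator updated by repeated addition.
import Mathlib
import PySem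

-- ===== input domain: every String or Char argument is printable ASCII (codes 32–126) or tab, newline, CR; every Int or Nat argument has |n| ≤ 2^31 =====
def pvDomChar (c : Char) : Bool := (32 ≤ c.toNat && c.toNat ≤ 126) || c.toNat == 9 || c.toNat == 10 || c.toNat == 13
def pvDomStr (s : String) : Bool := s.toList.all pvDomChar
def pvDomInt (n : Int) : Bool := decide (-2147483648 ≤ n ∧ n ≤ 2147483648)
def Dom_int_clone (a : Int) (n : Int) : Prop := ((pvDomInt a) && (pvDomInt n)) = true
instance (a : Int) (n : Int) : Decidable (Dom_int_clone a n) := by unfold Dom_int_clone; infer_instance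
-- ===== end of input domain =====

-- B replaces the running repeated-addition accumulator with a direct closed-form a*(i+1) per element (simpler, same cost).

-- ===== PORT A =====
-- loop state: (current a, num); tmp is the original a
def int_clone (a : Int) (n : Int) : List Int :=
  let tmp := a
  ((PySem.List.pyRange 0 n 1).foldl
    (fun (s : Int × List Int) _ => (s.1 + tmp, s.2 ++ [s.1])) (a, [])).2

-- ===== PORT B =====
def int_clone_alt (a : Int) (n : Int) : List Int :=
  (PySem.List.pyRange 0 n 1).map (fun i => a * (i + 1))

-- ===== PRECONDITION & SPEC =====
-- Pre_ excludes n ≤ 0, where A's assert raises AssertionError.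
def Pre_int_clone (a : Int) (n : Int) : Prop := 0 < n
instance (a : Int) (n : Int) : Decidable (Pre_int_clone a n) := by unfold Pre_int_clone; infer_instance
def pvWitness_int_clone : Int × Int := (3, 4)

def Spec_int_clone (a : Int) (n : Int) (out : List Int) : Prop := out = int_clone_alt a n
instance (a : Int) (n : Int) (out : List Int) : Decidable (Spec_int_clone a n out) := by unfold Spec_int_clone; infer_instance

-- ===== CLAIM (what is proved, stated in full; the proofs are below) =====
def Claim_equal_int_clone : Prop := ∀ (a : Int) (n : Int), Dom_int_clone a n → Pre_int_clone a n → Spec_int_clone a n (int_clone a n)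

-- ===== LEMMAS AND PROOFS =====

-- Invariant: after folding over any list of length k from state (cur, acc), the result is
-- (cur + k*tmp, acc ++ [cur, cur+tmp, ..., cur+(k-1)*tmp]).
theorem int_clone_fold_inv (tmp : Int) (l : List Int) (cur : Int) (acc : List Int) :
    l.foldl (fun (s : Int × List Int) _ => (s.1 + tmp, s.2 ++ [s.1])) (cur, acc)
      = (cur + l.length * tmp,
         acc ++ (List.range l.length).map (fun j : Nat => cur + (j : Int) * tmp)) := by
  induction l generalizing cur acc with
  | nil => simp
  | cons x xs ih =>
    rw [List.foldl_cons, ih, List.length_cons, List.range_succ_eq_map]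
    simp only [List.map_cons, List.map_map, List.append_assoc, List.singleton_append]
    refine Prod.ext ?_ ?_
    · simp only; push_cast; ring
    · simp only [Nat.cast_zero, zero_mul, add_zero]
      congr 2
      apply List.map_congr_left
      intro j _
      simp only [Function.comp_apply, Nat.succ_eq_add_one]
      push_cast; ring

-- ===== VERDICT (by name: the statement is the Claim_ definition above) =====
theorem int_clone_spec : Claim_equal_int_clone := by
  intro a n _ _
  unfold Spec_int_clone int_clone_alt
  show ((PySem.List.pyRange 0 n 1).foldl
    (fun (s : Int × List Int) _ => (s.1 + a, s.2 ++ [s.1])) (a, [])).2 = _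
  rw [int_clone_fold_inv, PySem.List.pyRange_one 0 n]
  simp only [List.map_map, List.length_map, List.nil_append, List.length_range]
  apply List.map_congr_left
  intro j _
  simp only [Function.comp_apply]
  ring
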